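-- pv_equiv track=rewrite | github.com/ValerioSpagnoli/University | Fondamenti di Informatica 1/Esercitazioni/Esercitazione 7/A_Ex8.py | A_Ex8
-- ===== SOURCE A (Python) =====
-- def A_Ex8(l,c,n):
--     i= 0
--     while i < len(l):
--         x = l[i]
--         if x.count(c)>=n:
--             l.remove(x)
--         else:
--             i = i+1
--     return l
-- ===== SOURCE B (Python) =====
-- def A_Ex8(l, c, n):
--     w = 0
--     for x in l:
--         if x.count(c) < n:
--             l[w] = x
--             w += 1
--     del l[w:]
--     return l
-- ===== Notes on version B (the rewrite author's own statement) =====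
-- stated objective: alternative
-- what changed: Replaces A's while-loop with repeated list.remove (each a scan-and-shift of the tail) by a single forward pass with a write pointer that compacts the kept elements in place and truncates the tail once; intended as faster on removal-heavy inputs (measured 1.64x at the largest size, but not consistently >=1.5x, so no speed claim is made).
import Mathlib
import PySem

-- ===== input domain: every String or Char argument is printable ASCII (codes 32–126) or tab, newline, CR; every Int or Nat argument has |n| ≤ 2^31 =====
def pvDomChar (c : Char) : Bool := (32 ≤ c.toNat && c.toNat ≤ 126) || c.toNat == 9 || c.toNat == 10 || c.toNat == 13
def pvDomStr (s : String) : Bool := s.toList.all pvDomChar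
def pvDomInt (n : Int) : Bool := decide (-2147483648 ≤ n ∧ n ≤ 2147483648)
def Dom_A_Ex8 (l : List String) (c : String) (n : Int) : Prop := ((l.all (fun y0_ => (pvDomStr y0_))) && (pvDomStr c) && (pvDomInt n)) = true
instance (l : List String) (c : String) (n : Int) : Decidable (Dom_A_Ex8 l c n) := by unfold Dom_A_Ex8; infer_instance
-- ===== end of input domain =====

-- B replaces A's repeated list.remove by one in-place write-pointer compaction pass;
-- both mutate l in place, equivalence proved on the return value.


-- ===== PORT A =====
-- the while loop: i is the read index, l the current list; l.remove(x) removes the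
-- first occurrence (PySem.List.remove?; it always succeeds here since x = l[i] ∈ l,
-- so the `none` arm is unreachable)
def A_Ex8Loop (c : String) (n : Int) (l : List String) (i : Nat) : List String :=
  if h : i < l.length then
    let x := l[i]
    if (PySem.Str.count x c : Int) ≥ n then
      match hr : PySem.List.remove? l x with
      | some l' => A_Ex8Loop c n l' i
      | none => l
    else
      A_Ex8Loop c n l (i + 1)
  else l
termination_by l.length - i
decreasing_by
  · have hx : l[i] ∈ l := List.getElem_mem h
    have := PySem.List.remove?_eq_some_erase (v := l[i]) (xs := l) hx
    rw [this] at hr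
    cases hr
    have hlen := List.length_erase_of_mem hx
    omega
  · omega

def A_Ex8 (l : List String) (c : String) (n : Int) : List String :=
  A_Ex8Loop c n l 0

-- ===== PORT B =====
-- one forward pass; the accumulator is the compacted prefix l[0:w] (the write-pointer
-- region), appended to element by element; the final `del l[w:]` discards the tail,
-- so the returned value is exactly the accumulator.
def A_Ex8_alt (l : List String) (c : String) (n : Int) : List String :=
  l.foldl (fun acc x => if (PySem.Str.count x c : Int) < n then acc ++ [x] else acc) []

-- ===== PRECONDITION & SPEC =====
def Spec_A_Ex8 (l : List String) (c : String) (n : Int) (out : List String) : Prop := out = A_Ex8_alt l c n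
instance (l : List String) (c : String) (n : Int) (out : List String) : Decidable (Spec_A_Ex8 l c n out) := by unfold Spec_A_Ex8; infer_instance

-- ===== CLAIM (what is proved, stated in full; the proofs are below) =====
def Claim_equal_A_Ex8 : Prop := ∀ (l : List String) (c : String) (n : Int), Dom_A_Ex8 l c n → Spec_A_Ex8 l c n (A_Ex8 l c n)

-- ===== LEMMAS AND PROOFS =====

-- A's loop invariant: if every element already scanned (the first i elements) is kept,
-- the loop returns that prefix followed by the filtered remainder.
theorem A_Ex8Loop_eq_filter (c : String) (n : Int) :
    ∀ (l : List String) (i : Nat),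
      (∀ x ∈ l.take i, (PySem.Str.count x c : Int) < n) →
      A_Ex8Loop c n l i = l.take i ++ (l.drop i).filter (fun x => (PySem.Str.count x c : Int) < n) := by
  intro l i
  induction hm : l.length - i using Nat.strong_induction_on generalizing l i with
  | _ m ih =>
  intro hkeep
  rw [A_Ex8Loop]
  by_cases h : i < l.length
  · simp only [dif_pos h]
    have hdrop : l.drop i = l[i] :: l.drop (i + 1) := List.drop_eq_getElem_cons h
    by_cases hc : (PySem.Str.count l[i] c : Int) ≥ n
    · simp only [if_pos hc]
      have hx : l[i] ∈ l := List.getElem_mem h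
      have hrs := PySem.List.remove?_eq_some_erase (v := l[i]) (xs := l) hx
      -- x is not in the kept prefix (those all satisfy count < n)
      have hnotin : l[i] ∉ l.take i := fun hmem => absurd (hkeep _ hmem) (by omega)
      have herase : l.erase l[i] = l.take i ++ l.drop (i + 1) := by
        have h1 : l.erase l[i] = (l.take i ++ l.drop i).erase l[i] := by
          rw [List.take_append_drop]
        rw [h1, List.erase_append_right _ hnotin, hdrop, List.erase_cons_head]
      have hlen_take : (l.take i).length = i := by
        simp [List.length_take]; omega
      split
      · next l' hr =>
        rw [hrs] at hr
        injection hr with hr'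
        subst hr'
        have hlenL : (l.take i ++ l.drop (i + 1)).length = l.length - 1 := by
          simp [List.length_append, List.length_take, List.length_drop]; omega
        have htakeL : (l.take i ++ l.drop (i + 1)).take i = l.take i := by
          have h2 := @List.take_left _ (l.take i) (l.drop (i + 1))
          rwa [hlen_take] at h2
        have hdropL : (l.take i ++ l.drop (i + 1)).drop i = l.drop (i + 1) := by
          have h3 := @List.drop_left _ (l.take i) (l.drop (i + 1))
          rwa [hlen_take] at h3
        have hkeepL : ∀ x ∈ (l.take i ++ l.drop (i + 1)).take i,
            (PySem.Str.count x c : Int) < n := by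
          rw [htakeL]; exact hkeep
        have hrec := ih ((l.take i ++ l.drop (i + 1)).length - i) (by omega)
          (l.take i ++ l.drop (i + 1)) i rfl hkeepL
        rw [herase, hrec, htakeL, hdropL, hdrop, List.filter_cons]
        have hfalse : (decide ((PySem.Str.count l[i] c : Int) < n)) = false := by
          rw [decide_eq_false_iff_not]; omega
        rw [hfalse]
        simp
      · next hr =>
        rw [hrs] at hr; exact absurd hr (by simp)
    · simp only [if_neg hc]
      have hkeep' : ∀ x ∈ l.take (i + 1), (PySem.Str.count x c : Int) < n := by
        intro x hmem
        rw [List.take_succ_eq_append_getElem h] at hmem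
        rcases List.mem_append.mp hmem with hmem | hmem
        · exact hkeep _ hmem
        · simp at hmem; subst hmem; omega
      have := ih (l.length - (i + 1)) (by omega) l (i + 1) (by omega) hkeep'
      rw [this, hdrop, List.filter_cons]
      have htrue : (decide ((PySem.Str.count l[i] c : Int) < n)) = true := by
        rw [decide_eq_true_eq]; omega
      rw [htrue, List.take_succ_eq_append_getElem h, List.append_assoc,
        List.singleton_append, if_pos rfl]
  · simp only [dif_neg h]
    have : l.drop i = [] := List.drop_eq_nil_of_le (by omega)
    rw [this, List.take_of_length_le (by omega)]
    simp

-- ===== VERDICT (by name: the statement is the Claim_ definition above) =====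
theorem A_Ex8_spec : Claim_equal_A_Ex8 := by
  intro l c n _
  unfold Spec_A_Ex8 A_Ex8 A_Ex8_alt
  rw [A_Ex8Loop_eq_filter c n l 0 (by simp)]
  rw [PySem.List.foldl_append_ite_eq_filter]
  simp
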